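-- pv_equiv track=rewrite | github.com/kpraposas/NumerMath | lectures/linearsystemex.py | An
-- ===== SOURCE A (Python) =====
-- def An(n):
--     An = [[0]*n for i in range(n)]
--     for i in range(n):
--         An[i][i] = 2
--     for i in range(n):
--         for j in range(n):
--             if i == j + 1 or j == i + 1:
--                 An[i][j] = -1
--     for i in range(n):
--         for j in range(n):
--             An[i][j] *= (n + 1)**2
--     return An
-- ===== SOURCE B (Python) =====
-- def An(n):
--     c = (n + 1) ** 2
--     M = [[0] * n for _ in range(n)]
--     for i in range(n):
--         M[i][i] = 2 * c
--         if i + 1 < n: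
--             M[i][i + 1] = -c
--             M[i + 1][i] = -c
--     return M
-- ===== Notes on version B (the rewrite author's own statement) =====
-- stated objective: simpler
-- what changed: B computes the scale (n+1)**2 once and fills only the tridiagonal band in a single loop over i, instead of A's three full-grid passes (diagonal pass, nested equality scan for the off-diagonals, then a nested scaling scan).
import Mathlib
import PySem

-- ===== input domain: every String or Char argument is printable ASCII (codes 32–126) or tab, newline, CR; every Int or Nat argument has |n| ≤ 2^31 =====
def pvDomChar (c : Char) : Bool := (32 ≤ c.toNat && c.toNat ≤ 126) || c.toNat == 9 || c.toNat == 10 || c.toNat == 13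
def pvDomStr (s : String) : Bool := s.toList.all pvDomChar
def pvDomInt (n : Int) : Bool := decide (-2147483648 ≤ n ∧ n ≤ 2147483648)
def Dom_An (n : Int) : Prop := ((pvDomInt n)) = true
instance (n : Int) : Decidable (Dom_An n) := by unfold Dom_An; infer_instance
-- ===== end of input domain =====

-- B fills only the tridiagonal band in one loop instead of A's three full-grid passes; return values are identical.

-- in-range matrix assignment M[i][j] = v (all uses below have i, j in range, where Python's assignment is exact)
def setAt (M : List (List Int)) (i j : Nat) (v : Int) : List (List Int) :=
  M.set i ((M.getD i []).set j v)

-- ===== PORT A =====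
def An (n : Int) : List (List Int) :=
  let N := n.toNat   -- range(n) is empty for n ≤ 0
  let M0 := (List.range N).map (fun _ => List.replicate N (0 : Int))
  let M1 := (List.range N).foldl (fun M i => setAt M i i 2) M0
  let M2 := (List.range N).foldl (fun M i =>
      (List.range N).foldl (fun M j =>
        if i = j + 1 ∨ j = i + 1 then setAt M i j (-1) else M) M) M1
  (List.range N).foldl (fun M i =>
      (List.range N).foldl (fun M j =>
        setAt M i j (((M.getD i []).getD j 0) * (n + 1) ^ 2)) M) M2

-- ===== PORT B =====
def An_alt (n : Int) : List (List Int) :=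
  let c := (n + 1) ^ 2
  let N := n.toNat
  let M0 := (List.range N).map (fun _ => List.replicate N (0 : Int))
  (List.range N).foldl (fun M i =>
    let M1 := setAt M i i (2 * c)
    if i + 1 < N then setAt (setAt M1 i (i + 1) (-c)) (i + 1) i (-c) else M1) M0

-- ===== PRECONDITION & SPEC =====
def Spec_An (n : Int) (out : List (List Int)) : Prop := out = An_alt n
instance (n : Int) (out : List (List Int)) : Decidable (Spec_An n out) := by unfold Spec_An; infer_instance

-- ===== CLAIM (what is proved, stated in full; the proofs are below) =====
def Claim_equal_An : Prop := ∀ (n : Int), Dom_An n → Spec_An n (An n)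

-- ===== LEMMAS AND PROOFS =====

-- matrix given by an index function
def mk (N : Nat) (f : Nat → Nat → Int) : List (List Int) :=
  (List.range N).map (fun i => (List.range N).map (fun j => f i j))

theorem mk_congr {N : Nat} {f g : Nat → Nat → Int}
    (h : ∀ i j, i < N → j < N → f i j = g i j) : mk N f = mk N g := by
  unfold mk
  apply List.map_congr_left
  intro i hi
  apply List.map_congr_left
  intro j hj
  exact h i j (List.mem_range.mp hi) (List.mem_range.mp hj)

theorem row_mk {N : Nat} {f : Nat → Nat → Int} {i : Nat} (hi : i < N) :
    (mk N f).getD i [] = (List.range N).map (f i) := by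
  have hl : i < (mk N f).length := by simp [mk, hi]
  rw [List.getD_eq_getElem _ _ hl]
  simp [mk]

theorem getD_mk {N : Nat} {f : Nat → Nat → Int} {i j : Nat} (hi : i < N) (hj : j < N) :
    ((mk N f).getD i []).getD j 0 = f i j := by
  have h2 : j < ((List.range N).map (f i)).length := by simp [hj]
  rw [row_mk hi, List.getD_eq_getElem _ _ h2]
  simp

theorem setAt_mk {N : Nat} {f : Nat → Nat → Int} {i j : Nat} (hi : i < N) (hj : j < N) (v : Int) :
    setAt (mk N f) i j v = mk N (fun i' j' => if i' = i ∧ j' = j then v else f i' j') := by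
  unfold setAt
  rw [row_mk hi]
  unfold mk
  apply List.ext_getElem
  · simp
  · intro a h1 h2
    simp only [List.length_set, List.length_map, List.length_range] at h1
    rw [List.getElem_set]
    split_ifs with ha
    · subst ha
      apply List.ext_getElem
      · simp
      · intro b hb1 hb2
        simp only [List.length_set, List.length_map, List.length_range] at hb1
        rw [List.getElem_set]
        simp only [List.getElem_map, List.getElem_range]
        rcases eq_or_ne j b with hb | hb
        · subst hb; simp
        · simp [hb, Ne.symm hb]
    · simp only [List.getElem_map, List.getElem_range]
      apply List.map_congr_left
      intro b _
      have : ¬ (a = i ∧ b = j) := by omega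
      simp [this]

theorem setAt_oob {N : Nat} {f : Nat → Nat → Int} {i j : Nat} (hi : N ≤ i) (v : Int) :
    setAt (mk N f) i j v = mk N f := by
  unfold setAt
  apply List.set_eq_of_length_le
  simpa [mk] using hi

-- A's diagonal pass
theorem passA1 (N : Nat) (f : Nat → Nat → Int) (m : Nat) (hm : m ≤ N) :
    (List.range m).foldl (fun M i => setAt M i i 2) (mk N f)
      = mk N (fun i j => if i = j ∧ i < m then 2 else f i j) := by
  induction m with
  | zero => simpa using mk_congr (by intro i j _ _; simp)
  | succ m ih =>
    rw [List.range_succ, List.foldl_append, ih (by omega)]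
    simp only [List.foldl_cons, List.foldl_nil]
    rw [setAt_mk (by omega) (by omega)]
    apply mk_congr
    intro i j _ _
    split_ifs <;> omega

-- A's off-diagonal pass, inner loop
theorem passA2_inner (N : Nat) (f : Nat → Nat → Int) (i : Nat) (m : Nat) (hm : m ≤ N) :
    (List.range m).foldl (fun M j =>
        if i = j + 1 ∨ j = i + 1 then setAt M i j (-1) else M) (mk N f)
      = mk N (fun i' j' => if i' = i ∧ j' < m ∧ (i = j' + 1 ∨ j' = i + 1) then -1 else f i' j') := by
  induction m with
  | zero => simpa using (mk_congr (by intro i' j' _ _; simp)).symm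
  | succ m ih =>
    rw [List.range_succ, List.foldl_append, ih (by omega)]
    simp only [List.foldl_cons, List.foldl_nil]
    split_ifs with hc
    · rcases Nat.lt_or_ge i N with hi | hi
      · rw [setAt_mk hi (by omega)]
        apply mk_congr
        intro i' j' _ _
        split_ifs <;> omega
      · rw [setAt_oob hi]
        apply mk_congr
        intro i' j' hi' _
        split_ifs <;> omega
    · apply mk_congr
      intro i' j' _ _
      split_ifs <;> omega

-- A's off-diagonal pass, outer loop
theorem passA2 (N : Nat) (f : Nat → Nat → Int) (m : Nat) (hm : m ≤ N) :
    (List.range m).foldl (fun M i =>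
        (List.range N).foldl (fun M j =>
          if i = j + 1 ∨ j = i + 1 then setAt M i j (-1) else M) M) (mk N f)
      = mk N (fun i' j' => if i' < m ∧ (i' = j' + 1 ∨ j' = i' + 1) then -1 else f i' j') := by
  induction m with
  | zero => simpa using (mk_congr (by intro i' j' _ _; simp)).symm
  | succ m ih =>
    rw [List.range_succ, List.foldl_append, ih (by omega)]
    simp only [List.foldl_cons, List.foldl_nil]
    rw [passA2_inner N _ m N (le_refl N)]
    apply mk_congr
    intro i' j' _ hj'
    split_ifs <;> omega

-- A's scaling pass, inner loop
theorem passA3_inner (N : Nat) (c : Int) (f : Nat → Nat → Int) (i : Nat) (hi : i < N)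
    (m : Nat) (hm : m ≤ N) :
    (List.range m).foldl (fun M j =>
        setAt M i j (((M.getD i []).getD j 0) * c)) (mk N f)
      = mk N (fun i' j' => if i' = i ∧ j' < m then f i j' * c else f i' j') := by
  induction m with
  | zero => simpa using (mk_congr (by intro i' j' _ _; simp)).symm
  | succ m ih =>
    rw [List.range_succ, List.foldl_append, ih (by omega)]
    simp only [List.foldl_cons, List.foldl_nil]
    rw [getD_mk hi (by omega), setAt_mk hi (by omega)]
    have : ¬ (i = i ∧ m < m) := by omega
    rw [if_neg this]
    apply mk_congr
    intro i' j' _ _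
    split_ifs <;> first | rfl | omega | (congr 2 <;> omega)

-- A's scaling pass, outer loop
theorem passA3 (N : Nat) (c : Int) (f : Nat → Nat → Int) (m : Nat) (hm : m ≤ N) :
    (List.range m).foldl (fun M i =>
        (List.range N).foldl (fun M j =>
          setAt M i j (((M.getD i []).getD j 0) * c)) M) (mk N f)
      = mk N (fun i' j' => if i' < m then f i' j' * c else f i' j') := by
  induction m with
  | zero => simpa using (mk_congr (by intro i' j' _ _; simp)).symm
  | succ m ih =>
    rw [List.range_succ, List.foldl_append, ih (by omega)]
    simp only [List.foldl_cons, List.foldl_nil]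
    rw [passA3_inner N c _ m (by omega) N (le_refl N)]
    apply mk_congr
    intro i' j' _ _
    split_ifs <;> first | rfl | omega | (congr 2 <;> omega)

-- B's single band-filling pass
theorem passB (N : Nat) (c : Int) (f : Nat → Nat → Int) (m : Nat) (hm : m ≤ N) :
    (List.range m).foldl (fun M i =>
        if i + 1 < N then setAt (setAt (setAt M i i (2 * c)) i (i + 1) (-c)) (i + 1) i (-c)
        else setAt M i i (2 * c)) (mk N f)
      = mk N (fun i' j' =>
          if i' = j' ∧ i' < m then 2 * c
          else if j' = i' + 1 ∧ i' < m then -c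
          else if i' = j' + 1 ∧ j' < m then -c
          else f i' j') := by
  induction m with
  | zero => simpa using (mk_congr (by intro i' j' _ _; simp)).symm
  | succ m ih =>
    rw [List.range_succ, List.foldl_append, ih (by omega)]
    simp only [List.foldl_cons, List.foldl_nil]
    split_ifs with hc
    · rw [setAt_mk (by omega) (by omega) (2 * c), setAt_mk (by omega) hc, setAt_mk hc (by omega)]
      apply mk_congr
      intro i' j' _ _
      split_ifs <;> first | rfl | omega
      all_goals (exfalso; omega)
    · rw [setAt_mk (by omega) (by omega) (2 * c)]
      apply mk_congr
      intro i' j' _ hj'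
      split_ifs <;> first | rfl | omega

theorem zero_mk (N : Nat) :
    (List.range N).map (fun _ => List.replicate N (0 : Int)) = mk N (fun _ _ => 0) := by
  unfold mk
  apply List.map_congr_left
  intro i _
  simp [List.map_const']

-- ===== VERDICT (by name: the statement is the Claim_ definition above) =====
theorem An_spec : Claim_equal_An := by
  intro n _
  unfold Spec_An An An_alt
  simp only []
  rw [zero_mk,
    passA1 n.toNat _ n.toNat (le_refl _),
    passA2 n.toNat _ n.toNat (le_refl _),
    passA3 n.toNat ((n + 1) ^ 2) _ n.toNat (le_refl _),
    passB n.toNat ((n + 1) ^ 2) _ n.toNat (le_refl _)]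
  apply mk_congr
  intro i j hi hj
  split_ifs <;> first | ring | omega
  all_goals (exfalso; omega)
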